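-- pv_equiv track=rewrite | github.com/NPOpenSource/jass-plugin | APIParse/apiParseBJToSnippet.py | parseFunctionParamers
-- ===== SOURCE A (Python) =====
-- def replaceKeyValue(template,key,value):
--     return template.replace(key,value)
--
-- def parseFunctionParamers(index,list,callBackParamers):
--     key =""
--     while list[index] != "returns":
--         if list[index] == "nothing":
--             index=index+1
--             break;
--         if (len(key) == 0):
--             key=list[index]
--         else:
--             callBackParamers[key]=replaceKeyValue(list[index],",","")
--             key=""
--         index=index+1
--     return index
-- ===== SOURCE B (Python) =====
-- def parseFunctionParamers(index, list, callBackParamers):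
--     # Two-phase: find the terminator first, then pair up the tokens before it.
--     start = index
--     while list[index] not in ("returns", "nothing"):
--         index += 1
--     tokens = list[start:index]
--     for i in range(0, len(tokens) - 1, 2):
--         callBackParamers[tokens[i]] = tokens[i + 1].replace(",", "")
--     if list[index] == "nothing":
--         index += 1
--     return index
-- ===== Notes on version B (the rewrite author's own statement) =====
-- stated objective: alternative
-- what changed: A's single pass with a key/value parity toggle is replaced by a boundary-finding scan to the first 'returns'/'nothing', a slice, and a stride-2 pairing loop over the slice; the return value is computed from the boundary alone.
import Mathlib
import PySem

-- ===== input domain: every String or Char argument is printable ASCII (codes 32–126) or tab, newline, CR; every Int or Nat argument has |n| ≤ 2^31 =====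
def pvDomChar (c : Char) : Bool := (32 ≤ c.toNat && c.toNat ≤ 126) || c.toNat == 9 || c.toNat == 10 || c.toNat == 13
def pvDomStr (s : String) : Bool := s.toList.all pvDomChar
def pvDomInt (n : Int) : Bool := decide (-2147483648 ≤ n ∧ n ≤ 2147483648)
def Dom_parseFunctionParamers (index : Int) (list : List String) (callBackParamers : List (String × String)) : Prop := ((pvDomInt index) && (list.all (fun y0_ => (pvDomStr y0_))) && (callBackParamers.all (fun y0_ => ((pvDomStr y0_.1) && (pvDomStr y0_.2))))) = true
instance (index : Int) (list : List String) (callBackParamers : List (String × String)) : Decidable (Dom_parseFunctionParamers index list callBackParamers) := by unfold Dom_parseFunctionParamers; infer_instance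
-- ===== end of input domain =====

-- B replaces A's inline key/value parity-toggle pass by a terminator-finding scan plus a stride-2
-- pairing pass over the slice (objective: alternative decomposition, same cost). The theorems are
-- about the RETURN value only: both Pythons also mutate the callBackParamers dict (A's toggle skips
-- empty-string tokens there, B pairs them), a side effect not captured by the Int return type.

-- an in-range pyGet? index is below the length (cited by both loops' decreasing_by)
theorem pvGet_lt {α : Type} {xs : List α} {i : Int} {x : α}
    (h : PySem.List.pyGet? xs i = some x) : i < (xs.length : Int) := by
  by_contra hn
  have : PySem.List.pyGet? xs i = none := by
    rw [PySem.List.pyGet?_eq_none_iff]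
    intro hr
    exact hn hr.2
  simp [this] at h

-- ===== PORT A =====
-- A's while loop: carries the parity key and the dict; returns index where Python raises IndexError
-- (those inputs are outside Pre_).
def pvLoopA (list : List String) (cb : PySem.Dict String String) (key : String) (index : Int) : Int :=
  match h : PySem.List.pyGet? list index with
  | none => index
  | some s =>
    if s == "returns" then index
    else if s == "nothing" then index + 1
    else if PySem.Str.len key == 0 then pvLoopA list cb s (index + 1)
    else pvLoopA list (cb.insert key (PySem.Str.replace s "," "")) "" (index + 1)
termination_by ((list.length : Int) - index).toNat
decreasing_by all_goals (have := pvGet_lt h; omega)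

def parseFunctionParamers (index : Int) (list : List String) (callBackParamers : List (String × String)) : Int :=
  pvLoopA list (PySem.Dict.ofList callBackParamers) "" index

-- ===== PORT B =====
-- B's first phase: advance until list[index] is "returns" or "nothing" (returns index where Python
-- raises IndexError; outside Pre_).
def pvFindTerm (list : List String) (index : Int) : Int :=
  match h : PySem.List.pyGet? list index with
  | none => index
  | some s => if s == "returns" || s == "nothing" then index else pvFindTerm list (index + 1)
termination_by ((list.length : Int) - index).toNat
decreasing_by have := pvGet_lt h; omega

def parseFunctionParamers_alt (index : Int) (list : List String) (callBackParamers : List (String × String)) : Int :=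
  let start := index
  let t := pvFindTerm list index
  let tokens := PySem.List.slice list (some start) (some t)
  let _cb := (PySem.List.pyRange 0 (PySem.List.len tokens - 1) 2).foldl
      (fun (d : PySem.Dict String String) i =>
        d.insert (PySem.List.pyGetD tokens i "")
                 (PySem.Str.replace (PySem.List.pyGetD tokens (i + 1) "") "," ""))
      (PySem.Dict.ofList callBackParamers)
  if PySem.List.pyGet? list t == some "nothing" then t + 1 else t

-- ===== PRECONDITION & SPEC =====
-- Pre_: scanning j = index, index+1, … reaches a "returns"/"nothing" token through in-range
-- (possibly Python-negative) indices; on all other inputs the Python A raises IndexError.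
def pvPreB (index : Int) (list : List String) : Bool :=
  -- outside [-len, len) the very first access list[index] already raises IndexError
  if index < -(list.length : Int) || (list.length : Int) ≤ index then false
  else (PySem.List.pyRange index (list.length : Int) 1).any (fun j =>
      (PySem.List.pyGet? list j).any (fun s => s == "returns" || s == "nothing") &&
      (PySem.List.pyRange index j 1).all (fun i =>
        match PySem.List.pyGet? list i with
        | some s => !(s == "returns" || s == "nothing")
        | none => false))

def Pre_parseFunctionParamers (index : Int) (list : List String) (_callBackParamers : List (String × String)) : Prop :=
  pvPreB index list = true
instance (index : Int) (list : List String) (callBackParamers : List (String × String)) : Decidable (Pre_parseFunctionParamers index list callBackParamers) := by unfold Pre_parseFunctionParamers; infer_instance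

def pvWitness_parseFunctionParamers : Int × List String × (List (String × String)) :=
  (0, ["a", "b,", "nothing"], [])

def Spec_parseFunctionParamers (index : Int) (list : List String) (callBackParamers : List (String × String)) (out : Int) : Prop := out = parseFunctionParamers_alt index list callBackParamers
instance (index : Int) (list : List String) (callBackParamers : List (String × String)) (out : Int) : Decidable (Spec_parseFunctionParamers index list callBackParamers out) := by unfold Spec_parseFunctionParamers; infer_instance

-- ===== CLAIM (what is proved, stated in full; the proofs are below) =====
def Claim_equal_parseFunctionParamers : Prop := ∀ (index : Int) (list : List String) (callBackParamers : List (String × String)), Dom_parseFunctionParamers index list callBackParamers → Pre_parseFunctionParamers index list callBackParamers → Spec_parseFunctionParamers index list callBackParamers (parseFunctionParamers index list callBackParamers)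

-- ===== LEMMAS AND PROOFS =====

theorem pvFindTerm_none {list : List String} {index : Int}
    (h : PySem.List.pyGet? list index = none) : pvFindTerm list index = index := by
  rw [pvFindTerm]; split <;> simp_all

theorem pvFindTerm_term {list : List String} {index : Int} {s : String}
    (h : PySem.List.pyGet? list index = some s) (ht : (s == "returns" || s == "nothing") = true) :
    pvFindTerm list index = index := by
  rw [pvFindTerm]; split <;> simp_all

theorem pvFindTerm_step {list : List String} {index : Int} {s : String}
    (h : PySem.List.pyGet? list index = some s) (ht : (s == "returns" || s == "nothing") = false) :
    pvFindTerm list index = pvFindTerm list (index + 1) := by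
  rw [pvFindTerm]; split <;> simp_all

-- A's loop equals B's two-phase result, unconditionally: A's key/dict state never influences the
-- returned index, and both sides stop at the same first terminator (or the same missing index).
theorem pvLoopA_eq_findTerm (list : List String) (cb : PySem.Dict String String)
    (key : String) (index : Int) :
    pvLoopA list cb key index =
      (if PySem.List.pyGet? list (pvFindTerm list index) == some "nothing"
       then pvFindTerm list index + 1 else pvFindTerm list index) := by
  fun_induction pvLoopA list cb key index with
  | case1 cb key index h => rw [pvFindTerm_none h]; simp [h]
  | case2 cb key index s h hr => rw [pvFindTerm_term h (by simp [hr])]; simp_all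
  | case3 cb key index s h hr hn => rw [pvFindTerm_term h (by simp [hn])]; simp_all
  | case4 cb key index s h hr hn hk ih => rw [pvFindTerm_step h (by simp_all)]; exact ih
  | case5 cb key index s h hr hn hk ih => rw [pvFindTerm_step h (by simp_all)]; exact ih

-- ===== VERDICT (by name: the statement is the Claim_ definition above) =====
theorem parseFunctionParamers_spec : Claim_equal_parseFunctionParamers := by
  intro index list callBackParamers _ _
  unfold Spec_parseFunctionParamers parseFunctionParamers parseFunctionParamers_alt
  exact pvLoopA_eq_findTerm list (PySem.Dict.ofList callBackParamers) "" index
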